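-- pv_equiv track=rewrite | github.com/BlackZoda/gunther | utils/table_paragraphs.py | create_table_paragraphs_by_column
-- ===== SOURCE A (Python) =====
-- def create_table_paragraphs_by_column(table):
--     """
--     Converts a table (list of rows, where table[0] is the header) into
--     paragraphs where each paragraph starts with a header (prefixed with '##')
--     followed by an unordered list of all the values in that column.
--
--     Example output:
--
--     ## Manann
--     * Blessing of Battle
--     * Blessing of Breath
--
--     ## Morr
--     * Blessing of Breath
--     * Blessing of Courage
--     """
--     paragraphs = []
--     headers = table[0]
--     # For each column index in headers:
--     for col_index, header in enumerate(headers):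
--         # Start a paragraph with a header line:
--         lines = [f"## {header}"]
--         # Iterate over each data row:
--         for row in table[1:]:
--             # Check if the row has a cell at this column index.
--             if col_index < len(row):
--                 cell = row[col_index]
--                 # Only include non-empty cells
--                 if cell.strip():
--                     lines.append(f"* {cell.strip()}")
--         paragraphs.append("\n".join(lines))
--     return paragraphs
-- ===== SOURCE B (Python) =====
-- def create_table_paragraphs_by_column(table):
--     headers = table[0]
--     accs = [[f"## {h}"] for h in headers]
--     for row in table[1:]:
--         for col_index, cell in enumerate(row):
--             if col_index < len(accs):
--                 c = cell.strip()
--                 if c: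
--                     accs[col_index].append(f"* {c}")
--     return ["\n".join(lines) for lines in accs]
-- ===== Notes on version B (the rewrite author's own statement) =====
-- stated objective: alternative
-- what changed: Inverted the loop nesting: instead of rescanning table[1:] once per header column, B seeds one accumulator per header and fills all of them in a single row-major pass, then joins each accumulator.
import Mathlib
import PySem

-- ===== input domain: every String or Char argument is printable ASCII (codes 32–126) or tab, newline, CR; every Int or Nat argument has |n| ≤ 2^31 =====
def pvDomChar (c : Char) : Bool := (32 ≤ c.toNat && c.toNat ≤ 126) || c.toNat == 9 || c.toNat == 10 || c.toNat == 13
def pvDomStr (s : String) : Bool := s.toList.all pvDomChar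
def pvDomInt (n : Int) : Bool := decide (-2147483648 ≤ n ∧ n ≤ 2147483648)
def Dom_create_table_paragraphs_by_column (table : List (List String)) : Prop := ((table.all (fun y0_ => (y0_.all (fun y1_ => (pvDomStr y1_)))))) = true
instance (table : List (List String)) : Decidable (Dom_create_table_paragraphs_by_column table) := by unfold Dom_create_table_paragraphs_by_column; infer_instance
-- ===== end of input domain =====

-- B inverts A's loop nesting: one row-major pass filling a per-column accumulator
-- list, instead of re-scanning table[1:] once per header column.


-- ===== PORT A =====
def create_table_paragraphs_by_column (table : List (List String)) : List String :=
  match table with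
  | [] => []   -- unreachable under Pre_ (Python raises IndexError on table[0])
  | headers :: rows =>
    (PySem.List.enumerate headers).foldl (fun paragraphs p =>
      let lines := rows.foldl (fun lines row =>
        if p.1 < (row.length : Int) then
          let cell := PySem.List.pyGetD row p.1 ""
          if PySem.Str.strip cell ≠ "" then lines ++ ["* " ++ PySem.Str.strip cell]
          else lines
        else lines) ["## " ++ p.2]
      paragraphs ++ [PySem.Str.join "\n" lines]) []

-- ===== PORT B =====
def create_table_paragraphs_by_column_alt (table : List (List String)) : List String :=
  match table with
  | [] => []   -- unreachable under Pre_ (Python raises IndexError on table[0])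
  | headers :: rows =>
    let accs0 := headers.map (fun h => ["## " ++ h])
    let accs := rows.foldl (fun accs row =>
      row.zipIdx.foldl (fun accs p =>
        if p.2 < accs.length then
          let c := PySem.Str.strip p.1
          if c ≠ "" then accs.modify p.2 (· ++ ["* " ++ c]) else accs
        else accs) accs) accs0
    accs.map (fun lines => PySem.Str.join "\n" lines)

-- ===== PRECONDITION & SPEC =====
-- Python A raises IndexError on the empty table (table[0]); B raises there too.
def Pre_create_table_paragraphs_by_column (table : List (List String)) : Prop := table ≠ []
instance (table : List (List String)) : Decidable (Pre_create_table_paragraphs_by_column table) := by unfold Pre_create_table_paragraphs_by_column; infer_instance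
def pvWitness_create_table_paragraphs_by_column : List (List String) := [["h1", "h2"], ["a", ""], [" b "]]
def Spec_create_table_paragraphs_by_column (table : List (List String)) (out : List String) : Prop := out = create_table_paragraphs_by_column_alt table
instance (table : List (List String)) (out : List String) : Decidable (Spec_create_table_paragraphs_by_column table out) := by unfold Spec_create_table_paragraphs_by_column; infer_instance

-- ===== CLAIM (what is proved, stated in full; the proofs are below) =====
def Claim_equal_create_table_paragraphs_by_column : Prop := ∀ (table : List (List String)), Dom_create_table_paragraphs_by_column table → Pre_create_table_paragraphs_by_column table → Spec_create_table_paragraphs_by_column table (create_table_paragraphs_by_column table)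

-- ===== LEMMAS AND PROOFS =====

-- A's inner per-column step, with a Nat column index.
def pvColStep (i : Nat) (lines : List String) (row : List String) : List String :=
  if i < row.length ∧ PySem.Str.strip (row.getD i "") ≠ "" then
    lines ++ ["* " ++ PySem.Str.strip (row.getD i "")]
  else lines

-- B's per-row fold (the inner loop of B's single pass).
def pvStepG (accs : List (List String)) (p : String × Nat) : List (List String) :=
  if p.2 < accs.length then
    let c := PySem.Str.strip p.1
    if c ≠ "" then accs.modify p.2 (· ++ ["* " ++ c]) else accs
  else accs

def pvRowFold (accs : List (List String)) (row : List String) : List (List String) :=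
  (row.zipIdx).foldl pvStepG accs

theorem pvStepG_getElem? (accs : List (List String)) (x : String) (k i : Nat) :
    (pvStepG accs (x, k))[i]? =
      if k = i then accs[i]?.map (fun l => pvColStep 0 l [x]) else accs[i]? := by
  unfold pvStepG pvColStep
  by_cases hk : k < accs.length
  · simp only [hk, if_true]
    by_cases hc : PySem.Str.strip x ≠ ""
    · by_cases hki : k = i <;> simp [hki, hc]
    · simp only [ne_eq, not_not] at hc
      by_cases hki : k = i <;> simp [hki, hc]
  · have h0 : accs[k]? = none := by
      rw [List.getElem?_eq_none_iff]; omega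
    simp only [hk, if_false]
    by_cases hki : k = i
    · subst hki; simp [h0]
    · simp [hki]

theorem pvZipFold_getElem? (row : List String) (k : Nat) (accs : List (List String)) (i : Nat) :
    ((row.zipIdx k).foldl pvStepG accs)[i]? =
      if k ≤ i then accs[i]?.map (fun l => pvColStep (i - k) l row) else accs[i]? := by
  induction row generalizing k accs with
  | nil =>
    simp only [List.zipIdx_nil, List.foldl_nil]
    split_ifs with h
    · cases hx : accs[i]? <;> simp [pvColStep]
    · rfl
  | cons x xs ih =>
    rw [List.zipIdx_cons, List.foldl_cons, ih]
    by_cases hk1 : k + 1 ≤ i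
    · have hk : k ≤ i := by omega
      have hne : k ≠ i := by omega
      simp only [hk1, if_true, hk, if_true, pvStepG_getElem?, hne, if_false]
      cases hx : accs[i]? with
      | none => rfl
      | some l =>
        simp only [Option.map_some]
        congr 1
        unfold pvColStep
        have h1 : i - k = (i - (k + 1)) + 1 := by omega
        rw [h1]
        simp only [List.getD_cons_succ, List.length_cons, Nat.succ_lt_succ_iff]
    · simp only [hk1, if_false, pvStepG_getElem?]
      by_cases hki : k = i
      · subst hki
        simp only [if_true, le_refl, if_true, Nat.sub_self]
        cases hx : accs[k]? with
        | none => rfl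
        | some l =>
          simp only [Option.map_some]
          congr 1
          unfold pvColStep
          simp [List.getD]
      · have : ¬ k ≤ i := by omega
        simp [hki, this]

theorem pvRowFold_getElem? (accs : List (List String)) (row : List String) (i : Nat) :
    (pvRowFold accs row)[i]? = accs[i]?.map (fun l => pvColStep i l row) := by
  unfold pvRowFold
  have := pvZipFold_getElem? row 0 accs i
  simpa using this

-- Outer fold, pointwise: B's single pass acts per column like A's per-column fold.
theorem pvFoldRows_getElem? (rows : List (List String)) (accs : List (List String)) (i : Nat) :
    (rows.foldl pvRowFold accs)[i]? = (accs[i]?).map (fun l => rows.foldl (fun l r => pvColStep i l r) l) := by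
  induction rows generalizing accs with
  | nil => cases hx : accs[i]? <;> simp [hx]
  | cons r rs ih =>
    simp only [List.foldl_cons, ih, pvRowFold_getElem?, Option.map_map]
    rfl

-- A's append-build fold is a map.
theorem pvFoldl_append_map {α β : Type} (f : α → β) (l : List α) (init : List β) :
    l.foldl (fun acc x => acc ++ [f x]) init = init ++ l.map f := by
  induction l generalizing init with
  | nil => simp
  | cons x xs ih => simp [ih]

-- A's Int-indexed inner fold equals the Nat-indexed pvColStep fold.
theorem pvInner_eq_colStep (rows : List (List String)) (i : Nat) (init : List String) :
    rows.foldl (fun lines row =>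
      if (i : Int) < (row.length : Int) then
        if PySem.Str.strip (PySem.List.pyGetD row (i : Int) "") ≠ "" then
          lines ++ ["* " ++ PySem.Str.strip (PySem.List.pyGetD row (i : Int) "")]
        else lines
      else lines) init = rows.foldl (fun l r => pvColStep i l r) init := by
  apply PySem.List.foldl_congr_mem
  intro lines row _
  unfold pvColStep
  rw [PySem.List.pyGetD_natCast]
  by_cases h : i < row.length
  · have hi : (i : Int) < (row.length : Int) := by exact_mod_cast h
    simp only [hi, if_true, h, true_and]
  · have hi : ¬ (i : Int) < (row.length : Int) := by exact_mod_cast h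
    simp [hi, h]

-- ===== VERDICT (by name: the statement is the Claim_ definition above) =====
theorem create_table_paragraphs_by_column_spec : Claim_equal_create_table_paragraphs_by_column := by
  intro table _ hpre
  unfold Spec_create_table_paragraphs_by_column
  match table with
  | [] => exact absurd rfl hpre
  | headers :: rows =>
    show create_table_paragraphs_by_column (headers :: rows)
        = create_table_paragraphs_by_column_alt (headers :: rows)
    unfold create_table_paragraphs_by_column create_table_paragraphs_by_column_alt
    simp only
    rw [pvFoldl_append_map]
    apply List.ext_getElem?
    intro i
    rw [List.nil_append, List.getElem?_map, List.getElem?_map]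
    rw [PySem.List.getElem?_enumerate]
    rw [show (rows.foldl (fun accs row =>
        row.zipIdx.foldl (fun accs p =>
          if p.2 < accs.length then
            let c := PySem.Str.strip p.1
            if c ≠ "" then accs.modify p.2 (· ++ ["* " ++ c]) else accs
          else accs) accs) (headers.map (fun h => ["## " ++ h])))
      = rows.foldl pvRowFold (headers.map (fun h => ["## " ++ h])) from rfl]
    rw [pvFoldRows_getElem?, List.getElem?_map]
    cases hx : headers[i]? with
    | none => rfl
    | some h =>
      simp only [Option.map_some]
      congr 1
      have := pvInner_eq_colStep rows i ["## " ++ h]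
      simp only [Int.zero_add] at *
      rw [← this]
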